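-- pv_equiv track=rewrite | github.com/Don-Gp/nlp-pidgin-code-switching-full | src/utils/text_processing.py | tag_languages
-- ===== SOURCE A (Python) =====
-- def tag_languages(text, labels):
--     """Add XML-style tags based on language labels"""
--     if len(text) != len(labels):
--         raise ValueError("Text and labels must have the same length")
--
--     result = []
--     current_lang = labels[0]
--     current_text = text[0]
--
--     for i in range(1, len(text)):
--         if labels[i] == current_lang:
--             current_text += text[i]
--         else:
--             # Language switch detected
--             tag = "pidgin" if current_lang == "P" else "English"
--             result.append(f"<{tag}>{current_text}</{tag}>")
--
--             # Start new segment
--             current_lang = labels[i]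
--             current_text = text[i]
--
--     # Add final segment
--     tag = "pidgin" if current_lang == "P" else "English"
--     result.append(f"<{tag}>{current_text}</{tag}>")
--
--     return "".join(result)
-- ===== SOURCE B (Python) =====
-- def _wrap(lang, seg):
--     tag = "pidgin" if lang == "P" else "English"
--     return f"<{tag}>{seg}</{tag}>"
--
--
-- def tag_languages(text, labels):
--     """Add XML-style tags based on language labels"""
--     if len(text) != len(labels):
--         raise ValueError("Text and labels must have the same length")
--
--     pairs = list(zip(labels, text))[::-1]  # reversed, so pop() yields the next pair in O(1)
--     out = []
--     while pairs:
--         lang, t = pairs.pop()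
--         seg = [t]
--         while pairs and pairs[-1][0] == lang:
--             seg.append(pairs.pop()[1])
--         out.append(_wrap(lang, "".join(seg)))
--     return "".join(out)
-- ===== Notes on version B (the rewrite author's own statement) =====
-- stated objective: alternative
-- what changed: B zips labels with text and peels off one maximal same-label run per outer step (wrapping each run with a helper), instead of A's single index loop that carries current_lang/current_text accumulator state and flushes on each switch plus once more after the loop.
-- crash fix: On empty input ([], []) A raises IndexError at labels[0] while B's run-peeling loop never executes and returns ''. — e.g. on tag_languages([], []): A raises IndexError, B returns ""
import Mathlib
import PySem

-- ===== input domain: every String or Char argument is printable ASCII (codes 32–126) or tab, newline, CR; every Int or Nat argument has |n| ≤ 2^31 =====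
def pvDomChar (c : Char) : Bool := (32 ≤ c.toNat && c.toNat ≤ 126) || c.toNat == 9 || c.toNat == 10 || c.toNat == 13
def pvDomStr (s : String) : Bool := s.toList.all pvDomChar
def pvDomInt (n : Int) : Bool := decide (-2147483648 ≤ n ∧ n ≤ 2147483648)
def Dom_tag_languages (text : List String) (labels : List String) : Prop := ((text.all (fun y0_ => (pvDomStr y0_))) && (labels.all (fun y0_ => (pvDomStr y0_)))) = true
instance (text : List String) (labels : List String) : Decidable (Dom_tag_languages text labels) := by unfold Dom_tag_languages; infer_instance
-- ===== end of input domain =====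

-- B replaces A's index loop with accumulator state by a groupby-style decomposition that
-- peels one maximal same-label run off the zipped input per step (alternative; same O(n) cost).

-- ===== PORT A =====
def tag_languages (text : List String) (labels : List String) : String :=
  if text.length ≠ labels.length then ""   -- Python raises ValueError here (excluded by Pre_)
  else
    -- labels[0] / text[0]: IndexError on empty input (excluded by Pre_)
    let st := (PySem.List.pyRange 1 (PySem.List.len text) 1).foldl
      (fun (acc : List String × String × String) i =>
        if PySem.List.pyGetD labels i "" == acc.2.1 then
          (acc.1, acc.2.1, acc.2.2 ++ PySem.List.pyGetD text i "")
        else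
          let tag := if acc.2.1 == "P" then "pidgin" else "English"
          (acc.1 ++ ["<" ++ tag ++ ">" ++ acc.2.2 ++ "</" ++ tag ++ ">"],
           PySem.List.pyGetD labels i "", PySem.List.pyGetD text i ""))
      ([], (PySem.List.pyGet? labels 0).getD "", (PySem.List.pyGet? text 0).getD "")
    let tag := if st.2.1 == "P" then "pidgin" else "English"
    PySem.Str.join "" (st.1 ++ ["<" ++ tag ++ ">" ++ st.2.2 ++ "</" ++ tag ++ ">"])

-- ===== PORT B =====
def pvWrap (lang : String) (seg : String) : String :=
  let tag := if lang == "P" then "pidgin" else "English"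
  "<" ++ tag ++ ">" ++ seg ++ "</" ++ tag ++ ">"

-- one outer-loop step of Source B: pop the head pair, pop while the label repeats (the inner
-- while loop = takeWhile/dropWhile), wrap the run, recurse on the rest.  Source B keeps the
-- pair list reversed so pop() is O(1); the port consumes the same sequence front-first.
def pvGroups : List (String × String) → List String
  | [] => []
  | (lang, t) :: rest =>
      let run := rest.takeWhile (fun p => p.1 == lang)
      pvWrap lang (PySem.Str.join "" (t :: run.map Prod.snd)) ::
        pvGroups (rest.dropWhile (fun p => p.1 == lang))
  termination_by l => l.length
  decreasing_by
    simp only [List.length_cons]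
    exact Nat.lt_succ_of_le (List.length_dropWhile_le _ _)

def tag_languages_alt (text : List String) (labels : List String) : String :=
  if text.length ≠ labels.length then ""   -- Python raises ValueError here (excluded by Pre_)
  else PySem.Str.join "" (pvGroups (labels.zip text))

-- ===== PRECONDITION & SPEC =====
-- A raises ValueError on a length mismatch and IndexError (labels[0]) on empty input; Pre_ excludes exactly those.
def Pre_tag_languages (text : List String) (labels : List String) : Prop :=
  text.length = labels.length ∧ text ≠ []
instance (text : List String) (labels : List String) : Decidable (Pre_tag_languages text labels) := by
  unfold Pre_tag_languages; infer_instance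
def pvWitness_tag_languages : List String × List String := (["a", "b", "c"], ["P", "P", "E"])

-- On empty input ([], []) A raises IndexError at labels[0] while B's run-peeling loop never executes and returns ''.
def Raises_tag_languages (text : List String) (labels : List String) : Prop :=
  text = [] ∧ labels = []
instance (text : List String) (labels : List String) : Decidable (Raises_tag_languages text labels) := by
  unfold Raises_tag_languages; infer_instance
def pvRaiseWitness_tag_languages : List String × List String := ([], [])
def pvRaiseWitnessOut_tag_languages : String := ""

def Spec_tag_languages (text : List String) (labels : List String) (out : String) : Prop := out = tag_languages_alt text labels
instance (text : List String) (labels : List String) (out : String) : Decidable (Spec_tag_languages text labels out) := by unfold Spec_tag_languages; infer_instance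

-- ===== CLAIM (what is proved, stated in full; the proofs are below) =====
def Claim_equal_tag_languages : Prop := ∀ (text : List String) (labels : List String), Dom_tag_languages text labels → Pre_tag_languages text labels → Spec_tag_languages text labels (tag_languages text labels)
def Claim_raises_tag_languages : Prop := (∀ (text : List String) (labels : List String), Dom_tag_languages text labels → Raises_tag_languages text labels → ¬ Pre_tag_languages text labels) ∧ (Dom_tag_languages (pvRaiseWitness_tag_languages.1) (pvRaiseWitness_tag_languages.2) ∧ Raises_tag_languages (pvRaiseWitness_tag_languages.1) (pvRaiseWitness_tag_languages.2) ∧ tag_languages_alt (pvRaiseWitness_tag_languages.1) (pvRaiseWitness_tag_languages.2) = pvRaiseWitnessOut_tag_languages)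

-- ===== LEMMAS AND PROOFS =====

-- A's loop body, expressed on a (label, text) pair
def pvStep (acc : List String × String × String) (p : String × String) : List String × String × String :=
  if p.1 == acc.2.1 then (acc.1, acc.2.1, acc.2.2 ++ p.2)
  else (acc.1 ++ [pvWrap acc.2.1 acc.2.2], p.1, p.2)

-- A's state-machine fold, flushed at the end, as a structural recursion
def pvFlush : List (String × String) → String → String → List String
  | [], lang, txt => [pvWrap lang txt]
  | (lg, t) :: rest, lang, txt =>
      if lg == lang then pvFlush rest lang (txt ++ t)
      else pvWrap lang txt :: pvFlush rest lg t

lemma pvJoinNil : PySem.Str.join "" ([] : List String) = "" := rfl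

lemma pvJoinCons (a : String) (l : List String) :
    PySem.Str.join "" (a :: l) = a ++ PySem.Str.join "" l := by
  apply String.ext
  simp [pysem, PySem.Chars.join, List.intercalate]
  cases l <;> simp

lemma pvJoinSingleton (a : String) : PySem.Str.join "" [a] = a := by
  rw [pvJoinCons, pvJoinNil, String.append_empty]

lemma pvFoldFlush (l : List (String × String)) : ∀ (res : List String) (lang txt : String),
    (l.foldl pvStep (res, lang, txt)).1 ++
      [pvWrap (l.foldl pvStep (res, lang, txt)).2.1 (l.foldl pvStep (res, lang, txt)).2.2]
      = res ++ pvFlush l lang txt := by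
  induction l with
  | nil => intro res lang txt; simp [pvFlush]
  | cons p rest ih =>
    obtain ⟨lg, t⟩ := p
    intro res lang txt
    by_cases h : (lg == lang) = true
    · simp [List.foldl_cons, pvStep, pvFlush, h, ih]
    · simp [List.foldl_cons, pvStep, pvFlush, h, ih]

lemma pvFlushGroups (l : List (String × String)) : ∀ (lang txt : String),
    pvFlush l lang txt = pvGroups ((lang, txt) :: l) := by
  induction l with
  | nil =>
    intro lang txt
    rw [pvFlush]
    simp [pvGroups, pvJoinSingleton]
  | cons p rest ih =>
    obtain ⟨lg, t⟩ := p
    intro lang txt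
    by_cases h : (lg == lang) = true
    · rw [pvFlush]
      simp only [h, if_true, ih]
      conv_lhs => rw [pvGroups]
      conv_rhs => rw [pvGroups]
      simp [List.takeWhile, List.dropWhile, h, pvJoinCons, String.append_assoc]
    · rw [pvFlush]
      simp only [h, if_false, Bool.false_eq_true, ih]
      conv_rhs => rw [pvGroups]
      simp [List.takeWhile, List.dropWhile, h, pvJoinSingleton]

-- ===== VERDICT (by name: the statement is the Claim_ definition above) =====
theorem tag_languages_spec : Claim_equal_tag_languages := by
  intro text labels _ hpre
  obtain ⟨hlen, hne⟩ := hpre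
  unfold Spec_tag_languages tag_languages tag_languages_alt
  rw [if_neg (by omega), if_neg (by omega)]
  match text, labels, hlen with
  | t :: ts, lg :: lgs, hlen =>
    have hlen' : ts.length = lgs.length := by simpa using hlen
    have hzlen : ((lg :: lgs).zip (t :: ts)).length = (t :: ts).length := by
      simp [List.length_zip]; omega
    -- replace the two indexed reads by one read of the zipped list
    have hcongr : ∀ (acc : List String × String × String) (i : Int),
        i ∈ PySem.List.pyRange 1 (PySem.List.len (t :: ts)) →
        (if PySem.List.pyGetD (lg :: lgs) i "" == acc.2.1 then
          (acc.1, acc.2.1, acc.2.2 ++ PySem.List.pyGetD (t :: ts) i "")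
         else
          let tag := if acc.2.1 == "P" then "pidgin" else "English"
          (acc.1 ++ ["<" ++ tag ++ ">" ++ acc.2.2 ++ "</" ++ tag ++ ">"],
           PySem.List.pyGetD (lg :: lgs) i "", PySem.List.pyGetD (t :: ts) i ""))
        = pvStep acc (PySem.List.pyGetD ((lg :: lgs).zip (t :: ts)) i ("", "")) := by
      intro acc i hi
      rw [PySem.List.mem_pyRange_one] at hi
      simp only [PySem.List.len_eq] at hi
      have h0 : (0:Int) ≤ i := by omega
      have hiT : i < (((t :: ts) : List String).length : Int) := by exact_mod_cast hi.2
      have hiL : i < (((lg :: lgs) : List String).length : Int) := by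
        rw [show ((((lg :: lgs) : List String).length : Int)) = (((t :: ts) : List String).length : Int) from by exact_mod_cast hlen.symm]
        exact hiT
      have hiZ : i < ((((lg :: lgs).zip (t :: ts)) : List (String × String)).length : Int) := by
        rw [show (((((lg :: lgs).zip (t :: ts)) : List (String × String)).length : Int)) = (((t :: ts) : List String).length : Int) from by exact_mod_cast hzlen]
        exact hiT
      rw [PySem.List.pyGetD_eq_getElem _ _ h0 hiL, PySem.List.pyGetD_eq_getElem _ _ h0 hiT,
        PySem.List.pyGetD_eq_getElem _ _ h0 hiZ, List.getElem_zip]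
      rfl
    rw [PySem.List.foldl_congr_mem _ _ _ _ (by intro acc x hx; exact hcongr acc x hx)]
    have hlenz : PySem.List.len ((t : String) :: ts) = PySem.List.len ((lg :: lgs).zip (t :: ts)) := by
      simp [PySem.List.len_eq]
      omega
    rw [hlenz, PySem.List.foldl_pyRange_pyGetD ((lg :: lgs).zip (t :: ts)) ("", "") pvStep _ (by norm_num)]
    have hgets : ((PySem.List.pyGet? (lg :: lgs) 0).getD "") = lg ∧
        ((PySem.List.pyGet? (t :: ts) 0).getD "") = t := by
      constructor <;> simp [pysem]
    rw [hgets.1, hgets.2]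
    have hdrop : (((lg :: lgs).zip (t :: ts)).drop (Int.toNat 1)) = lgs.zip ts := by simp
    rw [hdrop]
    have := pvFoldFlush (lgs.zip ts) [] lg t
    simp only [List.nil_append] at this
    have hw : ∀ (st : List String × String × String),
        PySem.Str.join "" (st.1 ++ [(fun tag => "<" ++ tag ++ ">" ++ st.2.2 ++ "</" ++ tag ++ ">")
          (if st.2.1 == "P" then "pidgin" else "English")])
        = PySem.Str.join "" (st.1 ++ [pvWrap st.2.1 st.2.2]) := by
      intro st; rfl
    calc PySem.Str.join ""
          (((lgs.zip ts).foldl pvStep ([], lg, t)).1 ++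
            [(let tag := if ((lgs.zip ts).foldl pvStep ([], lg, t)).2.1 == "P" then "pidgin" else "English"
              "<" ++ tag ++ ">" ++ ((lgs.zip ts).foldl pvStep ([], lg, t)).2.2 ++ "</" ++ tag ++ ">")])
        = PySem.Str.join "" (((lgs.zip ts).foldl pvStep ([], lg, t)).1 ++
            [pvWrap ((lgs.zip ts).foldl pvStep ([], lg, t)).2.1 ((lgs.zip ts).foldl pvStep ([], lg, t)).2.2]) := by
          rfl
      _ = PySem.Str.join "" (pvFlush (lgs.zip ts) lg t) := by rw [this]
      _ = PySem.Str.join "" (pvGroups ((lg, t) :: lgs.zip ts)) := by rw [pvFlushGroups]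
      _ = PySem.Str.join "" (pvGroups ((lg :: lgs).zip (t :: ts))) := by rfl

@[simp] theorem tag_languages_raises : Claim_raises_tag_languages := by
  unfold Claim_raises_tag_languages
  constructor
  · intro text labels _ hr hpre
    exact hpre.2 hr.1
  · refine ⟨by decide, ⟨rfl, rfl⟩, ?_⟩
    show tag_languages_alt [] [] = ""
    rw [tag_languages_alt, if_neg (by simp)]
    simp [pvGroups, pvJoinNil]
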